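-- pv_equiv track=rewrite | github.com/NMIL230/nmil-p-mc-ai-man02 | src/utils/modeling/experiment2.py | determine_methods
-- ===== SOURCE A (Python) =====
-- from typing import Dict, Any, List, Tuple, Optional
--
-- DEFAULT_METHOD_ORDER = [
--     "sequential_adaptive",
--     "halton",
--     "max_entropy_heuristic",
-- ]
--
-- def determine_methods(participants: Dict[str, Any], include_all: bool) -> List[str]:
--     methods: List[str] = []
--     method_set = set()
--     for _pid, pdata in participants.items():
--         exps = pdata.get("experiments", {})
--         for m in exps.keys():
--             if m not in method_set:
--                 method_set.add(m)
--                 methods.append(m)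
--     ordered = [m for m in DEFAULT_METHOD_ORDER if m in method_set]
--     ordered += [m for m in methods if m not in ordered]
--     if not include_all:
--         ordered = [m for m in ordered if m not in ("random", "max_entropy")]
--     return ordered
-- ===== SOURCE B (Python) =====
-- from typing import Dict, Any, List
--
-- DEFAULT_METHOD_ORDER = [
--     "sequential_adaptive",
--     "halton",
--     "max_entropy_heuristic",
-- ]
--
-- def determine_methods(participants: Dict[str, Any], include_all: bool) -> List[str]:
--     seen = dict.fromkeys(
--         m for pdata in participants.values() for m in pdata.get("experiments", {})
--     )
--     ranked = sorted(
--         seen,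
--         key=lambda m: DEFAULT_METHOD_ORDER.index(m)
--         if m in DEFAULT_METHOD_ORDER
--         else len(DEFAULT_METHOD_ORDER),
--     )
--     if include_all:
--         return ranked
--     return [m for m in ranked if m not in ("random", "max_entropy")]
-- ===== Notes on version B (the rewrite author's own statement) =====
-- stated objective: idiomatic
-- what changed: A collects distinct methods with an explicit seen-set loop and then builds the result as a filter-priority-list-then-append-remaining two-pass concatenation; B deduplicates the flattened method keys once (dict.fromkeys) and produces the final order with a single stable sort keyed by the method's rank in DEFAULT_METHOD_ORDER.
import Mathlib
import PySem

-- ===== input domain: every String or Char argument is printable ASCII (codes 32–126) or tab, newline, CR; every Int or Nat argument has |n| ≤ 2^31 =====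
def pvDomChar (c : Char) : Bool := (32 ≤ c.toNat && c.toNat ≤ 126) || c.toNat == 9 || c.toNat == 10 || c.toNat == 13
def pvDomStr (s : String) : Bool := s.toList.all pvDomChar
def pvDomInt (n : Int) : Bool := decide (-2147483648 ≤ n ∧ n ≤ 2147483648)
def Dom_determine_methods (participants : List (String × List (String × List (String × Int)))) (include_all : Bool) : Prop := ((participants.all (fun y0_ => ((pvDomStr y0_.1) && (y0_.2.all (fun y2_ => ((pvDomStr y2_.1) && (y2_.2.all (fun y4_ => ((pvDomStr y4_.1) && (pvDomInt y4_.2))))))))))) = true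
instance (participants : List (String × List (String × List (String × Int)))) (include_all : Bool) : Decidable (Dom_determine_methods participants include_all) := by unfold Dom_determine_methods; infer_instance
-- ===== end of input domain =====

-- B replaces A's filter-priority-then-append-remaining two-pass concatenation by one stable
-- sort of the deduplicated methods keyed by priority rank (idiomatic; same cost).

def DEFAULT_METHOD_ORDER : List String :=
  ["sequential_adaptive", "halton", "max_entropy_heuristic"]

-- ===== PORT A =====
-- 'for m in exps.keys()' iterates the dict's keys = the pairs' first components in insertion
-- order (a duplicated key in the association list is harmless: the set guard skips repeats).
def determine_methods (participants : List (String × List (String × List (String × Int)))) (include_all : Bool) : List String :=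
  let st := participants.foldl
    (fun (st : List String × PySem.Set String) pp =>
      ((PySem.Dict.getD (PySem.Dict.mk pp.2) "experiments" []).map Prod.fst).foldl
        (fun st m =>
          if PySem.Set.contains st.2 m then st
          else (st.1 ++ [m], PySem.Set.add st.2 m)) st)
    ([], PySem.Set.empty)
  let ordered := DEFAULT_METHOD_ORDER.filter (fun m => PySem.Set.contains st.2 m)
  let ordered2 := ordered ++ st.1.filter (fun m => !(ordered.contains m))
  if include_all then ordered2
  else ordered2.filter (fun m => !(m == "random" || m == "max_entropy"))

-- ===== PORT B =====
-- the sort key: DEFAULT_METHOD_ORDER.index(m) if m in DEFAULT_METHOD_ORDER else len(DEFAULT_METHOD_ORDER)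
def pvRank (m : String) : Int :=
  if m ∈ DEFAULT_METHOD_ORDER then (((PySem.List.index? DEFAULT_METHOD_ORDER m).getD 0 : Nat) : Int)
  else PySem.List.len DEFAULT_METHOD_ORDER

def determine_methods_alt (participants : List (String × List (String × List (String × Int)))) (include_all : Bool) : List String :=
  let seen := PySem.List.dedup (participants.flatMap
    (fun pp => (PySem.Dict.getD (PySem.Dict.mk pp.2) "experiments" []).map Prod.fst))
  let ranked := PySem.List.sorted seen pvRank
  if include_all then ranked
  else ranked.filter (fun m => !(m == "random" || m == "max_entropy"))

-- ===== PRECONDITION & SPEC =====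
def Spec_determine_methods (participants : List (String × List (String × List (String × Int)))) (include_all : Bool) (out : List String) : Prop := out = determine_methods_alt participants include_all
instance (participants : List (String × List (String × List (String × Int)))) (include_all : Bool) (out : List String) : Decidable (Spec_determine_methods participants include_all out) := by unfold Spec_determine_methods; infer_instance

-- ===== CLAIM (what is proved, stated in full; the proofs are below) =====
def Claim_equal_determine_methods : Prop := ∀ (participants : List (String × List (String × List (String × Int)))) (include_all : Bool), Dom_determine_methods participants include_all → Spec_determine_methods participants include_all (determine_methods participants include_all)

-- ===== LEMMAS AND PROOFS =====

lemma pvRank_eq (m : String) :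
    pvRank m = if m = "sequential_adaptive" then 0 else if m = "halton" then 1
      else if m = "max_entropy_heuristic" then 2 else 3 := by
  by_cases h1 : m = "sequential_adaptive"
  · subst h1; decide
  by_cases h2 : m = "halton"
  · subst h2; decide
  by_cases h3 : m = "max_entropy_heuristic"
  · subst h3; decide
  · simp [pvRank, DEFAULT_METHOD_ORDER, h1, h2, h3, PySem.List.len]

lemma pvRank_lt_three_iff (m : String) : pvRank m < 3 ↔ m ∈ DEFAULT_METHOD_ORDER := by
  rw [pvRank_eq]
  by_cases h1 : m = "sequential_adaptive" <;> by_cases h2 : m = "halton" <;>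
    by_cases h3 : m = "max_entropy_heuristic" <;>
    simp [DEFAULT_METHOD_ORDER, h1, h2, h3]

lemma pvRank_cases (m : String) :
    pvRank m = 0 ∨ pvRank m = 1 ∨ pvRank m = 2 ∨ pvRank m = 3 := by
  rw [pvRank_eq]; split_ifs <;> simp

lemma pvRank_zero_iff (m : String) : pvRank m = 0 ↔ m = "sequential_adaptive" := by
  rw [pvRank_eq]
  by_cases h1 : m = "sequential_adaptive" <;> by_cases h2 : m = "halton" <;>
    by_cases h3 : m = "max_entropy_heuristic" <;> simp [h1, h2, h3]

lemma pvRank_one_iff (m : String) : pvRank m = 1 ↔ m = "halton" := by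
  rw [pvRank_eq]
  by_cases h1 : m = "sequential_adaptive" <;> by_cases h2 : m = "halton" <;>
    by_cases h3 : m = "max_entropy_heuristic" <;> simp [h1, h2, h3]

lemma pvRank_two_iff (m : String) : pvRank m = 2 ↔ m = "max_entropy_heuristic" := by
  rw [pvRank_eq]
  by_cases h1 : m = "sequential_adaptive" <;> by_cases h2 : m = "halton" <;>
    by_cases h3 : m = "max_entropy_heuristic" <;> simp [h1, h2, h3]

-- A's pair loop keeps its two components equal: both are Set.update of the keys seen so far
lemma pvPairFold (l : List String) (s : PySem.Set String) :
    l.foldl (fun st m => if PySem.Set.contains st.2 m then st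
        else (st.1 ++ [m], PySem.Set.add st.2 m)) (s, s)
      = (PySem.Set.update s l, PySem.Set.update s l) := by
  induction l generalizing s with
  | nil => simp [PySem.Set.update]
  | cons a t ih =>
    have hstep : (if PySem.Set.contains s a then ((s : List String), s)
        else (s ++ [a], PySem.Set.add s a)) = (PySem.Set.add s a, PySem.Set.add s a) := by
      by_cases h : a ∈ s <;> simp [PySem.Set.add, PySem.Set.contains, h]
    simp only [List.foldl_cons, hstep, ih]
    simp [PySem.Set.update, PySem.Set.add]

-- A's whole collection loop: first-seen-order distinct methods, twice
lemma pvAfold (participants : List (String × List (String × List (String × Int)))) :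
    participants.foldl
      (fun (st : List String × PySem.Set String) pp =>
        ((PySem.Dict.getD (PySem.Dict.mk pp.2) "experiments" []).map Prod.fst).foldl
          (fun st m =>
            if PySem.Set.contains st.2 m then st
            else (st.1 ++ [m], PySem.Set.add st.2 m)) st)
      ([], PySem.Set.empty)
    = (PySem.Set.ofList (participants.flatMap
         (fun pp => (PySem.Dict.getD (PySem.Dict.mk pp.2) "experiments" []).map Prod.fst)),
       PySem.Set.ofList (participants.flatMap
         (fun pp => (PySem.Dict.getD (PySem.Dict.mk pp.2) "experiments" []).map Prod.fst))) := by
  rw [← List.foldl_flatMap]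
  exact pvPairFold _ PySem.Set.empty

lemma pvInsertBy_append_left {α : Type} (before : α → α → Bool) (x : α) (L1 L2 : List α)
    (h : ∀ y ∈ L1, before x y = false) :
    PySem.List.insertBy before x (L1 ++ L2) = L1 ++ PySem.List.insertBy before x L2 := by
  induction L1 with
  | nil => simp
  | cons a t ih =>
    have ha : before x a = false := h a (by simp)
    simp only [List.cons_append, PySem.List.insertBy, ha, Bool.false_eq_true, if_false]
    exact congrArg (a :: ·) (ih (fun y hy => h y (by simp [hy])))

lemma pvInsertBy_all_before {α : Type} (before : α → α → Bool) (x : α) (L : List α)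
    (h : ∀ y ∈ L, before x y = true) :
    PySem.List.insertBy before x L = x :: L := by
  cases L with
  | nil => simp [PySem.List.insertBy]
  | cons a t => simp [PySem.List.insertBy, h a (by simp)]

def pvGroups (M : List String) : List String :=
  (M.filter fun m => pvRank m == 0) ++ (M.filter fun m => pvRank m == 1) ++
  (M.filter fun m => pvRank m == 2) ++ (M.filter fun m => pvRank m == 3)

lemma pvMemG (M : List String) (i : Int) :
    ∀ y ∈ M.filter (fun m => pvRank m == i), pvRank y = i := by
  intro y hy
  have := List.of_mem_filter hy
  simpa using this

-- the stable sort by rank is the four rank groups concatenated, each in original order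
lemma pvSorted_decomp (M : List String) :
    PySem.List.sorted M pvRank = pvGroups M := by
  rw [PySem.List.sorted_eq_foldl_insertBy]
  induction M using List.reverseRecOn with
  | nil => simp [pvGroups]
  | append_singleton M x ih =>
    rw [List.foldl_append, List.foldl_cons, List.foldl_nil, ih]
    rcases pvRank_cases x with hx | hx | hx | hx
    · have e1 : pvGroups M = (M.filter fun m => pvRank m == 0) ++
          ((M.filter fun m => pvRank m == 1) ++
           ((M.filter fun m => pvRank m == 2) ++ (M.filter fun m => pvRank m == 3))) := by
        simp [pvGroups, List.append_assoc]
      rw [e1, pvInsertBy_append_left _ x _ _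
            (fun y hy => by have := pvMemG M 0 y hy; simp [hx, this]),
          pvInsertBy_all_before _ x _
            (fun y hy => by
              rcases List.mem_append.1 hy with h | h
              · have := pvMemG M 1 y h; simp [hx, this]
              rcases List.mem_append.1 h with h | h
              · have := pvMemG M 2 y h; simp [hx, this]
              · have := pvMemG M 3 y h; simp [hx, this])]
      simp [pvGroups, List.filter_append, hx, List.append_assoc]
    · have e1 : pvGroups M = ((M.filter fun m => pvRank m == 0) ++
          (M.filter fun m => pvRank m == 1)) ++
           ((M.filter fun m => pvRank m == 2) ++ (M.filter fun m => pvRank m == 3)) := by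
        simp [pvGroups, List.append_assoc]
      rw [e1, pvInsertBy_append_left _ x _ _
            (fun y hy => by
              rcases List.mem_append.1 hy with h | h
              · have := pvMemG M 0 y h; simp [hx, this]
              · have := pvMemG M 1 y h; simp [hx, this]),
          pvInsertBy_all_before _ x _
            (fun y hy => by
              rcases List.mem_append.1 hy with h | h
              · have := pvMemG M 2 y h; simp [hx, this]
              · have := pvMemG M 3 y h; simp [hx, this])]
      simp [pvGroups, List.filter_append, hx, List.append_assoc]
    · have e1 : pvGroups M = (((M.filter fun m => pvRank m == 0) ++
          (M.filter fun m => pvRank m == 1)) ++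
           (M.filter fun m => pvRank m == 2)) ++ (M.filter fun m => pvRank m == 3) := by
        simp [pvGroups, List.append_assoc]
      rw [e1, pvInsertBy_append_left _ x _ _
            (fun y hy => by
              rcases List.mem_append.1 hy with h | h
              · rcases List.mem_append.1 h with h' | h'
                · have := pvMemG M 0 y h'; simp [hx, this]
                · have := pvMemG M 1 y h'; simp [hx, this]
              · have := pvMemG M 2 y h; simp [hx, this]),
          pvInsertBy_all_before _ x _
            (fun y hy => by have := pvMemG M 3 y hy; simp [hx, this])]
      simp [pvGroups, List.filter_append, hx, List.append_assoc]
    · rw [PySem.List.insertBy_of_forall_not_before _ x _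
            (fun y hy => by
              rcases List.mem_append.1 hy with h | h
              · rcases List.mem_append.1 h with h' | h'
                · rcases List.mem_append.1 h' with h'' | h''
                  · have := pvMemG M 0 y h''; simp [hx, this]
                  · have := pvMemG M 1 y h''; simp [hx, this]
                · have := pvMemG M 2 y h'; simp [hx, this]
              · have := pvMemG M 3 y h; simp [hx, this])]
      simp [pvGroups, List.filter_append, hx, List.append_assoc]

lemma pvGroup_single (M : List String) (hM : M.Nodup) (i : Int) (a : String)
    (hchar : ∀ m, pvRank m = i ↔ m = a) :
    M.filter (fun m => pvRank m == i) = if a ∈ M then [a] else [] := by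
  have e : M.filter (fun m => pvRank m == i) = M.filter (fun m => m == a) :=
    List.filter_congr (fun m _ => by
      by_cases h : m = a
      · simp [h, (hchar a).2 rfl]
      · have hne : ¬ pvRank m = i := fun hh => h ((hchar m).1 hh)
        simp [h, hne])
  rw [e, List.filter_beq]
  by_cases h : a ∈ M
  · simp [h, List.count_eq_one_of_mem hM h]
  · simp [h, List.count_eq_zero_of_not_mem h]

-- A's priority pass over DEFAULT_METHOD_ORDER is the first three rank groups concatenated
lemma pvOrdered_eq (M : List String) (hM : M.Nodup) :
    DEFAULT_METHOD_ORDER.filter (fun m => PySem.Set.contains M m)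
      = (M.filter fun m => pvRank m == 0) ++ (M.filter fun m => pvRank m == 1) ++
        (M.filter fun m => pvRank m == 2) := by
  rw [pvGroup_single M hM 0 _ pvRank_zero_iff, pvGroup_single M hM 1 _ pvRank_one_iff,
      pvGroup_single M hM 2 _ pvRank_two_iff]
  by_cases h0 : "sequential_adaptive" ∈ M <;> by_cases h1 : "halton" ∈ M <;>
    by_cases h2 : "max_entropy_heuristic" ∈ M <;>
    simp [DEFAULT_METHOD_ORDER, PySem.Set.contains, List.contains_eq_mem, h0, h1, h2]

-- A's 'remaining methods' pass is the last rank group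
lemma pvTail_eq (M : List String) :
    M.filter (fun m =>
        !((DEFAULT_METHOD_ORDER.filter (fun m => PySem.Set.contains M m)).contains m))
      = M.filter (fun m => pvRank m == 3) :=
  List.filter_congr (fun m hm => by
    have hc : (DEFAULT_METHOD_ORDER.filter (fun m => PySem.Set.contains M m)).contains m
        = decide (m ∈ DEFAULT_METHOD_ORDER) := by
      rw [List.contains_eq_mem]
      simp [List.mem_filter, PySem.Set.contains, List.contains_eq_mem, hm]
    rw [hc]
    by_cases h : m ∈ DEFAULT_METHOD_ORDER
    · have hlt := (pvRank_lt_three_iff m).2 h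
      have h4 : ¬ pvRank m = 3 := by omega
      simp [h, h4]
    · have h4 : pvRank m = 3 := by
        rcases pvRank_cases m with h0 | h0 | h0 | h0 <;>
          first
          | exact h0
          | exact absurd ((pvRank_lt_three_iff m).1 (by omega)) h
      simp [h, h4])

-- ===== VERDICT (by name: the statement is the Claim_ definition above) =====
theorem determine_methods_spec : Claim_equal_determine_methods := by
  intro participants include_all _
  unfold Spec_determine_methods determine_methods determine_methods_alt
  simp only [pvAfold, PySem.List.dedup_eq_ofList, pvSorted_decomp]
  rw [pvTail_eq, pvOrdered_eq _ (PySem.Set.nodup_ofList _)]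
  cases include_all <;> simp [pvGroups, List.append_assoc]
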